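-- pv_equiv track=rewrite | github.com/sunray0620/disdoc | app/api_info.py | action_id_to_camel
-- ===== SOURCE A (Python) =====
-- def action_id_to_camel(action_id):
--   words = action_id.split('.')
--   new_words = [words[0]]
--   for i in range(1, len(words)):
--     if words[i]:
--       new_word = words[i][0].upper() + words[i][1:]
--       new_words.append(new_word)
--   return ''.join(new_words)
-- ===== SOURCE B (Python) =====
-- def action_id_to_camel(action_id):
--   out = []
--   after_dot = False
--   for c in action_id:
--     if c == '.':
--       after_dot = True
--     else:
--       out.append(c.upper() if after_dot else c)
--       after_dot = False
--   return ''.join(out)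
-- ===== Notes on version B (the rewrite author's own statement) =====
-- stated objective: simpler
-- what changed: Replaced split('.')+indexed loop over words+join with a single left-to-right character scan carrying an after-dot flag that drops dots and uppercases the first character after each dot run.
import Mathlib
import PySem

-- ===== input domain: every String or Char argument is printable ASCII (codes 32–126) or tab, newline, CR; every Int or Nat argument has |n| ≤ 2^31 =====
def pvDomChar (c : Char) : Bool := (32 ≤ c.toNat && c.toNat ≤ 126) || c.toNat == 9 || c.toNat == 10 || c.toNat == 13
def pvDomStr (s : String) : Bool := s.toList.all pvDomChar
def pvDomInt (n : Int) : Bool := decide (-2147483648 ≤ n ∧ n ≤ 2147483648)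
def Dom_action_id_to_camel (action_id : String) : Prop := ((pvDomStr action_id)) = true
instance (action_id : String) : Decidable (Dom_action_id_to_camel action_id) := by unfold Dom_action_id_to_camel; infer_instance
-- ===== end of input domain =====

-- B replaces A's split('.')+indexed word loop by a single character scan with an after-dot flag; objective: simpler, same O(n) cost.

-- ===== PORT A =====
def action_id_to_camel (action_id : String) : String :=
  let words := PySem.Chars.splitOn action_id.toList ['.']
  let new_words : List (List Char) := [words.headD []]   -- words[0]; split never returns an empty list
  let new_words := (PySem.List.pyRange 1 (words.length : Int) 1).foldl
    (fun acc i =>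
      let w := (PySem.List.pyGet? words i).getD []       -- words[i]; i is always in range
      if w ≠ [] then
        acc ++ [[PySem.Chars.upperChar ((PySem.List.pyGet? w 0).getD ' ')] ++ PySem.List.slice w (some 1) none]
      else acc) new_words
  String.mk (PySem.Chars.join [] new_words)

-- ===== PORT B =====
def action_id_to_camel_alt (action_id : String) : String :=
  String.mk ((action_id.toList.foldl
    (fun (st : List Char × Bool) c =>
      if c == '.' then (st.1, true)
      else (st.1 ++ [if st.2 then PySem.Chars.upperChar c else c], false))
    ([], false)).1)

-- ===== PRECONDITION & SPEC =====
def Spec_action_id_to_camel (action_id : String) (out : String) : Prop := out = action_id_to_camel_alt action_id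
instance (action_id : String) (out : String) : Decidable (Spec_action_id_to_camel action_id out) := by unfold Spec_action_id_to_camel; infer_instance

-- ===== CLAIM (what is proved, stated in full; the proofs are below) =====
def Claim_equal_action_id_to_camel : Prop := ∀ (action_id : String), Dom_action_id_to_camel action_id → Spec_action_id_to_camel action_id (action_id_to_camel action_id)

-- ===== LEMMAS AND PROOFS =====

/-- Natural structural recursion computing `splitOn cs ['.']`. -/
def pvSp : List Char → List (List Char)
  | [] => [[]]
  | c :: r =>
    if c = '.' then [] :: pvSp r
    else match pvSp r with
         | w :: ws => (c :: w) :: ws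
         | [] => [[c]]

theorem pvSp_ne_nil (cs : List Char) : pvSp cs ≠ [] := by
  cases cs with
  | nil => simp [pvSp]
  | cons c r =>
    simp only [pvSp]
    split
    · simp
    · split <;> simp

theorem pvSplitOn_go_eq : ∀ (fuel : Nat) (l cur : List Char) (acc : List (List Char)),
    l.length ≤ fuel →
    PySem.Chars.splitOn.go ['.'] fuel l cur acc =
      acc.reverse ++ (match pvSp l with
                      | w :: ws => (cur.reverse ++ w) :: ws
                      | [] => []) := by
  intro fuel
  induction fuel with
  | zero =>
    intro l cur acc h
    have : l = [] := by cases l <;> simp_all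
    subst this
    simp [PySem.Chars.splitOn.go, pvSp]
  | succ fuel ih =>
    intro l cur acc h
    cases l with
    | nil => simp [PySem.Chars.splitOn.go, pvSp]
    | cons c rest =>
      by_cases hc : c = '.'
      · subst hc
        have hpre : List.isPrefixOf ['.'] ('.' :: rest) = true := by simp [List.isPrefixOf]
        rw [show PySem.Chars.splitOn.go ['.'] (fuel + 1) ('.' :: rest) cur acc =
              PySem.Chars.splitOn.go ['.'] fuel (List.drop (List.length ['.']) ('.' :: rest)) []
                (cur.reverse :: acc) by simp [PySem.Chars.splitOn.go, hpre]]
        simp only [List.length_singleton, List.drop_succ_cons, List.drop_zero]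
        rw [ih rest [] (cur.reverse :: acc) (by simpa using h)]
        rcases hne : pvSp rest with _ | ⟨w, ws⟩
        · exact absurd hne (pvSp_ne_nil rest)
        · simp [pvSp, hne]
      · have hpre : List.isPrefixOf ['.'] (c :: rest) = false := by
          simp [List.isPrefixOf]; exact fun h' => hc h'.symm
        rw [show PySem.Chars.splitOn.go ['.'] (fuel + 1) (c :: rest) cur acc =
              PySem.Chars.splitOn.go ['.'] fuel rest (c :: cur) acc by
            simp [PySem.Chars.splitOn.go, hpre]]
        rw [ih rest (c :: cur) acc (by simpa using h)]
        rcases hne : pvSp rest with _ | ⟨w, ws⟩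
        · exact absurd hne (pvSp_ne_nil rest)
        · simp [pvSp, hc, hne]

theorem pvSplitOn_eq (cs : List Char) : PySem.Chars.splitOn cs ['.'] = pvSp cs := by
  rw [PySem.Chars.splitOn, pvSplitOn_go_eq (cs.length + 1) cs [] [] (by omega)]
  rcases hne : pvSp cs with _ | ⟨w, ws⟩
  · exact absurd hne (pvSp_ne_nil cs)
  · simp

/-- What B's character scan emits, as a recursion on the remaining characters. -/
def pvB : Bool → List Char → List Char
  | _, [] => []
  | flag, c :: r =>
    if c = '.' then pvB true r
    else (if flag then PySem.Chars.upperChar c else c) :: pvB false r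

theorem pvFoldB_eq : ∀ (cs out : List Char) (flag : Bool),
    (cs.foldl (fun (st : List Char × Bool) c =>
        if c == '.' then (st.1, true)
        else (st.1 ++ [if st.2 then PySem.Chars.upperChar c else c], false)) (out, flag)).1
      = out ++ pvB flag cs := by
  intro cs
  induction cs with
  | nil => intro out flag; simp [pvB]
  | cons c r ih =>
    intro out flag
    rw [List.foldl_cons]
    by_cases hc : c = '.'
    · subst hc
      rw [if_pos (show (('.' : Char) == '.') = true from rfl), ih, show pvB flag ('.' :: r) = pvB true r from by simp [pvB]]
    · rw [if_neg (by simp [hc]), ih,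
        show pvB flag (c :: r) = (if flag then PySem.Chars.upperChar c else c) :: pvB false r
          from by simp [pvB, hc]]
      simp

/-- The words A's loop appends: each nonempty word with its first character uppercased. -/
def pvCapW : List (List Char) → List (List Char)
  | [] => []
  | [] :: ws => pvCapW ws
  | (c :: w) :: ws => (PySem.Chars.upperChar c :: w) :: pvCapW ws

theorem pvLoopA_eq (words : List (List Char)) : ∀ (k : Nat) (acc : List (List Char)),
    (PySem.List.pyRange (k : Int) (words.length : Int) 1).foldl
      (fun acc i =>
        let w := (PySem.List.pyGet? words i).getD []
        if w ≠ [] then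
          acc ++ [[PySem.Chars.upperChar ((PySem.List.pyGet? w 0).getD ' ')] ++ PySem.List.slice w (some 1) none]
        else acc) acc
    = acc ++ pvCapW (words.drop k) := by
  intro k
  induction hlen : words.length - k generalizing k with
  | zero =>
    intro acc
    have hk : words.length ≤ k := by omega
    rw [show PySem.List.pyRange (k : Int) (words.length : Int) 1 = [] by
      simp [PySem.List.pyRange]; omega]
    simp [List.drop_eq_nil_of_le hk, pvCapW]
  | succ n ih =>
    intro acc
    have hk : k < words.length := by omega
    rw [PySem.List.pyRange_one_cons (by exact_mod_cast hk)]
    have hget : PySem.List.pyGet? words (k : Int) = some (words[k]'hk) := by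
      rw [PySem.List.pyGet?_natCast]; simp [hk]
    have hdrop : words.drop k = words[k]'hk :: words.drop (k + 1) :=
      List.drop_eq_getElem_cons hk
    have hk1 : ((k : Int) + 1) = ((k + 1 : Nat) : Int) := by push_cast; ring
    simp only [List.foldl_cons, hget, Option.getD_some]
    rw [hk1, ih (k + 1) (by omega)]
    rcases hw : words[k]'hk with _ | ⟨c, w⟩
    · simp [hdrop, hw, pvCapW]
    · simp only [ne_eq, reduceCtorEq, not_false_eq_true, if_pos]
      have h0 : PySem.List.pyGet? (c :: w) 0 = some c := by
        rw [show (0 : Int) = ((0 : Nat) : Int) by norm_num, PySem.List.pyGet?_natCast]; simp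
      have hs : PySem.List.slice (c :: w) (some 1) none = w := by
        simp [pysem]
      rw [hdrop, hw]
      simp [pvCapW, hs]

theorem pvJoin_nil_flatten (ps : List (List Char)) : PySem.Chars.join [] ps = ps.flatten := by
  induction ps with
  | nil => simp [PySem.Chars.join, List.intercalate]
  | cons p ps ih =>
    cases ps with
    | nil => simp [PySem.Chars.join, List.intercalate]
    | cons q qs => simpa [PySem.Chars.join_cons_cons] using congrArg (p ++ · ) ih

theorem pvMain (cs : List Char) :
    ((pvSp cs).headD [] ++ (pvCapW ((pvSp cs).tail)).flatten = pvB false cs)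
    ∧ ((pvCapW (pvSp cs)).flatten = pvB true cs) := by
  induction cs with
  | nil => simp [pvSp, pvCapW, pvB]
  | cons c r ih =>
    obtain ⟨ih1, ih2⟩ := ih
    by_cases hc : c = '.'
    · subst hc
      constructor
      · simp [pvSp, pvB, ih2]
      · simp [pvSp, pvCapW, pvB, ih2]
    · rcases hne : pvSp r with _ | ⟨w, ws⟩
      · exact absurd hne (pvSp_ne_nil r)
      · constructor
        · simp only [pvSp, if_neg hc, hne]
          simp only [hne, List.headD_cons, List.tail_cons] at ih1
          simp [pvB, hc, ← ih1]
        · simp only [pvSp, if_neg hc, hne, pvCapW]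
          simp only [hne, List.headD_cons, List.tail_cons] at ih1
          simp [pvB, hc, ← ih1]

theorem pvLoopA_one (words : List (List Char)) :
    (PySem.List.pyRange 1 (words.length : Int) 1).foldl
      (fun acc i =>
        let w := (PySem.List.pyGet? words i).getD []
        if w ≠ [] then
          acc ++ [[PySem.Chars.upperChar ((PySem.List.pyGet? w 0).getD ' ')] ++ PySem.List.slice w (some 1) none]
        else acc) [words.headD []]
    = [words.headD []] ++ pvCapW words.tail := by
  have h := pvLoopA_eq words 1 [words.headD []]
  simpa [List.drop_one] using h

-- ===== VERDICT (by name: the statement is the Claim_ definition above) =====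
theorem action_id_to_camel_spec : Claim_equal_action_id_to_camel := by
  intro s _
  unfold Spec_action_id_to_camel action_id_to_camel action_id_to_camel_alt
  dsimp only
  rw [pvFoldB_eq s.toList [] false, pvSplitOn_eq, pvLoopA_one, pvJoin_nil_flatten]
  rcases hne : pvSp s.toList with _ | ⟨w, ws⟩
  · exact absurd hne (pvSp_ne_nil _)
  · have hmain := (pvMain s.toList).1
    rw [hne] at hmain
    simp only [List.headD_cons, List.tail_cons] at hmain ⊢
    simp [← hmain]
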